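-- pv_equiv track=rewrite | github.com/masiarek/starvote | add_extra_expl.py | calculate_preference_matrix
-- ===== SOURCE A (Python) =====
-- from collections import defaultdict
--
-- def calculate_preference_matrix(candidates, ballots):
--     """
--     Generates the pairwise preference matrix from already-parsed ballots.
--     """
--     if not ballots or not candidates:
--         return None
--
--     num_ballots = len(ballots)
--     matrix = defaultdict(lambda: defaultdict(tuple))
--
--     for c_i in candidates:
--         for c_j in candidates:
--             if c_i == c_j:
--                 matrix[c_i][c_j] = (0, 0, num_ballots)
--                 continue
--
--             for_i = 0
--             against_i = 0
--             no_pref = 0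
--
--             for ballot in ballots:
--                 s_i = ballot.get(c_i, 0)
--                 s_j = ballot.get(c_j, 0)
--
--                 if s_i > s_j:
--                     for_i += 1
--                 elif s_j > s_i:
--                     against_i += 1
--                 else:
--                     no_pref += 1
--
--             matrix[c_i][c_j] = (for_i, against_i, no_pref)
--
--     return matrix
-- ===== SOURCE B (Python) =====
-- from collections import defaultdict
--
-- def calculate_preference_matrix(candidates, ballots):
--     """
--     Per-ballot pass: every pair defaults to 'no preference'; only candidates with a
--     nonzero score on a ballot can create a preference, so we accumulate, per ballot,
--     pairwise stats among those and per-candidate sign counts, then assemble in O(C^2).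
--     """
--     if not ballots or not candidates:
--         return None
--
--     order = list(dict.fromkeys(candidates))
--     cset = set(order)
--     num_ballots = len(ballots)
--
--     # solo[c] = (#ballots with score > 0, #ballots with score < 0)
--     solo = defaultdict(lambda: (0, 0))
--     # pair[i, j] = (#ballots both nonzero and s_i > s_j,
--     #               #ballots s_i > 0 and s_j nonzero,
--     #               #ballots s_i < 0 and s_j nonzero)
--     pair = defaultdict(lambda: (0, 0, 0))
--
--     for ballot in ballots:
--         present = [(c, s) for c, s in ballot.items() if s != 0 and c in cset]
--         for c, s in present:
--             p, n = solo[c]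
--             solo[c] = (p + (s > 0), n + (s < 0))
--         for ci, si in present:
--             for cj, sj in present:
--                 if ci != cj:
--                     w, p, n = pair[ci, cj]
--                     pair[ci, cj] = (w + (si > sj), p + (si > 0), n + (si < 0))
--
--     matrix = {}
--     for ci in order:
--         row = {}
--         for cj in order:
--             if ci == cj:
--                 row[cj] = (0, 0, num_ballots)
--             else:
--                 fw, fp, fn = pair[ci, cj]
--                 aw, ap, an = pair[cj, ci]
--                 f = fw + (solo[ci][0] - fp) + (solo[cj][1] - an)
--                 a = aw + (solo[cj][0] - ap) + (solo[ci][1] - fn)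
--                 row[cj] = (f, a, num_ballots - f - a)
--         matrix[ci] = row
--     return matrix
-- ===== Notes on version B (the rewrite author's own statement) =====
-- stated objective: faster
-- what changed: Instead of scanning all ballots for every ordered candidate pair, B makes one pass per ballot over only its nonzero-scored candidates, accumulating pairwise co-occurrence and per-candidate sign counts, and assembles every cell in O(1) afterwards (absent pairs default to no-preference).
import Mathlib
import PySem

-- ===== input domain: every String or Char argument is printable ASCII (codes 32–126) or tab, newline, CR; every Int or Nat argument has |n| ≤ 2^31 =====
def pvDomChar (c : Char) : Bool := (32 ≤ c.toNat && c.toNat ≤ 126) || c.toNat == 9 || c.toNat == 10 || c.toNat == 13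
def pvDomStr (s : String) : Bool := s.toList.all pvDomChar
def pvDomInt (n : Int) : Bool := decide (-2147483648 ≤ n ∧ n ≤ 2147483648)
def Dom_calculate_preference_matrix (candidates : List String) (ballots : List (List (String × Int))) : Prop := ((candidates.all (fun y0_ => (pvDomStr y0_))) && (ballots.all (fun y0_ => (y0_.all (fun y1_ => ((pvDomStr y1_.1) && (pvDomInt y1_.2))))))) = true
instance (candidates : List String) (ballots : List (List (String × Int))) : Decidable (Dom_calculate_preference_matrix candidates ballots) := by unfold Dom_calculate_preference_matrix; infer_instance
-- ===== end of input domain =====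

-- ===== PORT A =====
-- one honest line: B replaces A's per-pair scan of all ballots by a per-ballot pass over
-- nonzero-scored candidates with co-occurrence/presence counters (measurably faster on sparse ballots).
def calculate_preference_matrix (candidates : List String) (ballots : List (List (String × Int))) : Option (List (String × List (String × Int × Int × Int))) :=
  if ballots.isEmpty || candidates.isEmpty then none else
  let numBallots : Int := ballots.length
  let matrix : PySem.Dict String (PySem.Dict String (Int × Int × Int)) :=
    candidates.foldl (fun m ci =>
      candidates.foldl (fun m cj =>
        if ci == cj then
          m.insert ci ((m.getD ci (PySem.Dict.mk [])).insert cj ((0 : Int), (0 : Int), numBallots))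
        else
          let t := ballots.foldl (fun (t : Int × Int × Int) ballot =>
            let si := (PySem.Dict.mk ballot).getD ci 0
            let sj := (PySem.Dict.mk ballot).getD cj 0
            if si > sj then (t.1 + 1, t.2.1, t.2.2)
            else if sj > si then (t.1, t.2.1 + 1, t.2.2)
            else (t.1, t.2.1, t.2.2 + 1)) ((0 : Int), (0 : Int), (0 : Int))
          m.insert ci ((m.getD ci (PySem.Dict.mk [])).insert cj t)) m) (PySem.Dict.mk [])
  some (matrix.items.map (fun r => (r.1, r.2.items)))

-- ===== PORT B =====
def pvB2i (b : Bool) : Int := if b then 1 else 0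

def calculate_preference_matrix_alt (candidates : List String) (ballots : List (List (String × Int))) : Option (List (String × List (String × Int × Int × Int))) :=
  if ballots.isEmpty || candidates.isEmpty then none else
  let order := PySem.List.dedup candidates
  let cset : PySem.Set String := PySem.Set.ofList order
  let numBallots : Int := ballots.length
  let st := ballots.foldl (fun (st : PySem.Dict String (Int × Int) × PySem.Dict (String × String) (Int × Int × Int)) ballot =>
    -- ballot.items() of a Python dict: first occurrence of each key
    let present : List (String × Int) :=
      (PySem.List.dedup (ballot.map Prod.fst)).filterMap (fun c =>
        let s := (PySem.Dict.mk ballot).getD c 0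
        if s ≠ 0 ∧ cset.contains c then some (c, s) else none)
    let solo := present.foldl (fun solo cs =>
      let pn := solo.getD cs.1 (0, 0)
      solo.insert cs.1 (pn.1 + pvB2i (cs.2 > 0), pn.2 + pvB2i (cs.2 < 0))) st.1
    let pair := present.foldl (fun pair ci =>
      present.foldl (fun pair cj =>
        if ci.1 ≠ cj.1 then
          let w := pair.getD (ci.1, cj.1) (0, 0, 0)
          pair.insert (ci.1, cj.1) (w.1 + pvB2i (ci.2 > cj.2), w.2.1 + pvB2i (ci.2 > 0), w.2.2 + pvB2i (ci.2 < 0))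
        else pair) pair) st.2
    (solo, pair)) (PySem.Dict.mk [], PySem.Dict.mk [])
  let solo := st.1
  let pair := st.2
  some (order.map (fun ci =>
    (ci, order.map (fun cj =>
      if ci = cj then (cj, ((0 : Int), (0 : Int), numBallots))
      else
        let fs := pair.getD (ci, cj) (0, 0, 0)
        let as_ := pair.getD (cj, ci) (0, 0, 0)
        let f := fs.1 + ((solo.getD ci (0, 0)).1 - fs.2.1) + ((solo.getD cj (0, 0)).2 - as_.2.2)
        let a := as_.1 + ((solo.getD cj (0, 0)).1 - as_.2.1) + ((solo.getD ci (0, 0)).2 - fs.2.2)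
        (cj, (f, a, numBallots - f - a))))))

-- ===== PRECONDITION & SPEC =====
def Spec_calculate_preference_matrix (candidates : List String) (ballots : List (List (String × Int))) (out : Option (List (String × List (String × Int × Int × Int)))) : Prop := out = calculate_preference_matrix_alt candidates ballots
instance (candidates : List String) (ballots : List (List (String × Int))) (out : Option (List (String × List (String × Int × Int × Int)))) : Decidable (Spec_calculate_preference_matrix candidates ballots out) := by
  unfold Spec_calculate_preference_matrix
  have h2 : DecidableEq (List (String × Int × Int × Int)) := inferInstance
  have h4 : DecidableEq (List (String × List (String × Int × Int × Int))) := inferInstance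
  infer_instance

-- ===== CLAIM (what is proved, stated in full; the proofs are below) =====
def Claim_equal_calculate_preference_matrix : Prop := ∀ (candidates : List String) (ballots : List (List (String × Int))), Dom_calculate_preference_matrix candidates ballots → Spec_calculate_preference_matrix candidates ballots (calculate_preference_matrix candidates ballots)

-- ===== LEMMAS AND PROOFS =====

-- proof-only helpers: per-ballot score and the per-pair tallies both programs compute
def pvSc (b : List (String × Int)) (c : String) : Int := (PySem.Dict.mk b).getD c 0

def pvG (i j : String) (b : List (String × Int)) : Int := if pvSc b i > pvSc b j then 1 else 0
def pvL (i j : String) (b : List (String × Int)) : Int :=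
  if pvSc b i > pvSc b j then 0 else if pvSc b j > pvSc b i then 1 else 0
def pvE (i j : String) (b : List (String × Int)) : Int :=
  if pvSc b i > pvSc b j then 0 else if pvSc b j > pvSc b i then 0 else 1

-- A's cell value, as sums over ballots
def pvCellA (ballots : List (List (String × Int))) (len : Int) (i j : String) : Int × Int × Int :=
  if i = j then (0, 0, len)
  else ((ballots.map (pvG i j)).sum, (ballots.map (pvL i j)).sum, (ballots.map (pvE i j)).sum)

-- ---------- generic dict lemmas ----------
theorem pv_getD_mk_map {κ T : Type} [BEq κ] [LawfulBEq κ] (W : κ → T) (l : List κ) (c : κ) (e : T) :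
    (PySem.Dict.mk (l.map (fun k => (k, W k)))).getD c e = if c ∈ l then W c else e := by
  induction l with
  | nil => simp [PySem.Dict.getD, PySem.Dict.get?]
  | cons a t ih =>
    by_cases hca : c = a
    · subst hca
      simp [PySem.Dict.getD, List.map_cons, PySem.Dict.get?_mk_cons]
    · have hba : (a == c) = false := by simp; exact fun h => hca h.symm
      simp only [List.map_cons, PySem.Dict.getD, PySem.Dict.get?_mk_cons, hba, if_false,
        Bool.false_eq_true, List.mem_cons]
      have := ih
      simp only [PySem.Dict.getD] at this
      rw [this]
      simp [hca]

theorem pv_contains_mk_map {κ T : Type} [BEq κ] [LawfulBEq κ] [DecidableEq κ] (W : κ → T) (l : List κ) (c : κ) :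
    (PySem.Dict.mk (l.map (fun k => (k, W k)))).contains c = decide (c ∈ l) := by
  rw [PySem.Dict.contains_eq_decide_mem_keys, PySem.Dict.keys_mk]
  simp

theorem pv_dedup_append_singleton {κ : Type} [BEq κ] [LawfulBEq κ] (acc : List κ) (c : κ) :
    PySem.List.dedup (acc ++ [c]) =
      if c ∈ acc then PySem.List.dedup acc else PySem.List.dedup acc ++ [c] := by
  simp only [PySem.List.dedup_eq_ofList, PySem.Set.ofList_eq_foldl, List.foldl_append,
    List.foldl_cons, List.foldl_nil]
  have hmem : c ∈ List.foldl PySem.Set.add [] acc ↔ c ∈ acc := by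
    have := PySem.Set.mem_ofList acc c
    rwa [PySem.Set.ofList_eq_foldl] at this
  by_cases h : c ∈ acc
  · simp only [h, if_true]
    simp [PySem.Set.add, hmem.mpr h]
  · simp only [h, if_false]
    simp only [PySem.Set.add]
    rw [if_neg]
    intro hc
    exact absurd (hmem.mp (by simpa using hc)) h

theorem pv_dedup_append_self {κ : Type} [BEq κ] [LawfulBEq κ] (l : List κ) :
    PySem.List.dedup (l ++ l) = PySem.List.dedup l := by
  have step : ∀ (ys acc : List κ), (∀ y ∈ ys, y ∈ acc) →
      PySem.List.dedup (acc ++ ys) = PySem.List.dedup acc := by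
    intro ys
    induction ys with
    | nil => intro acc _; simp
    | cons y t ih =>
      intro acc h
      have : acc ++ y :: t = (acc ++ [y]) ++ t := by simp
      rw [this, ih]
      · rw [pv_dedup_append_singleton, if_pos (h y (by simp))]
      · intro z hz
        exact List.mem_append_left _ (h z (by simp [hz]))
  exact step l l (fun y hy => hy)

theorem pv_insert_dedup_step {κ T : Type} [BEq κ] [LawfulBEq κ] [DecidableEq κ] (W : κ → T) (acc : List κ) (c : κ) :
    (PySem.Dict.mk ((PySem.List.dedup acc).map (fun k => (k, W k)))).insert c (W c)
      = PySem.Dict.mk ((PySem.List.dedup (acc ++ [c])).map (fun k => (k, W k))) := by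
  rw [pv_dedup_append_singleton]
  by_cases h : c ∈ acc
  · simp only [h, if_true]
    have hcont : (PySem.Dict.mk ((PySem.List.dedup acc).map (fun k => (k, W k)))).contains c = true := by
      rw [pv_contains_mk_map]
      simp [h]
    apply PySem.Dict.ext
    rw [PySem.Dict.items_insert_of_contains _ _ hcont]
    simp only [List.map_map]
    apply List.map_congr_left
    intro k _
    by_cases hk : k = c
    · subst hk; simp
    · simp [Function.comp, beq_iff_eq, hk]
  · simp only [h, if_false]
    have hcont : (PySem.Dict.mk ((PySem.List.dedup acc).map (fun k => (k, W k)))).contains c = false := by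
      rw [pv_contains_mk_map]
      simp [h]
    apply PySem.Dict.ext
    rw [PySem.Dict.items_insert_of_not_contains _ _ hcont]
    simp

theorem pv_foldl_insert_dedup {κ T : Type} [BEq κ] [LawfulBEq κ] [DecidableEq κ] (W : κ → T) :
    ∀ (cs acc : List κ),
      cs.foldl (fun d c => d.insert c (W c)) (PySem.Dict.mk ((PySem.List.dedup acc).map (fun k => (k, W k))))
        = PySem.Dict.mk ((PySem.List.dedup (acc ++ cs)).map (fun k => (k, W k))) := by
  intro cs
  induction cs with
  | nil => intro acc; simp
  | cons c t ih =>
    intro acc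
    simp only [List.foldl_cons]
    rw [pv_insert_dedup_step, ih (acc ++ [c])]
    simp

-- ---------- A-side lemmas ----------
theorem pv_A_triple (i j : String) :
    ∀ (bs : List (List (String × Int))) (t : Int × Int × Int),
      bs.foldl (fun (t : Int × Int × Int) ballot =>
          let si := (PySem.Dict.mk ballot).getD i 0
          let sj := (PySem.Dict.mk ballot).getD j 0
          if si > sj then (t.1 + 1, t.2.1, t.2.2)
          else if sj > si then (t.1, t.2.1 + 1, t.2.2)
          else (t.1, t.2.1, t.2.2 + 1)) t
        = (t.1 + (bs.map (pvG i j)).sum, t.2.1 + (bs.map (pvL i j)).sum, t.2.2 + (bs.map (pvE i j)).sum) := by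
  intro bs
  induction bs with
  | nil => intro t; simp
  | cons b tl ih =>
    intro t
    simp only [List.foldl_cons, List.map_cons, List.sum_cons]
    rw [ih]
    simp only [pvG, pvL, pvE, pvSc]
    split_ifs <;> simp <;> ring

-- the inner (row) loop touches only key ci
theorem pv_A_inner {T : Type} (ci : String) (v : String → T) :
    ∀ (cs : List String), cs ≠ [] → ∀ (m : PySem.Dict String (PySem.Dict String T)),
      cs.foldl (fun m cj => m.insert ci ((m.getD ci (PySem.Dict.mk [])).insert cj (v cj))) m
        = m.insert ci (cs.foldl (fun r cj => r.insert cj (v cj)) (m.getD ci (PySem.Dict.mk []))) := by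
  intro cs
  induction cs with
  | nil => intro h; exact absurd rfl h
  | cons c t ih =>
    intro _ m
    simp only [List.foldl_cons]
    by_cases ht : t = []
    · subst ht; simp
    · rw [ih ht]
      rw [PySem.Dict.getD_insert]
      rw [PySem.Dict.insert_insert_self]
      simp

-- the full nested loop builds the dedup matrix
theorem pv_A_matrix (candidates : List String) (cell : String → String → Int × Int × Int) :
    ∀ (cs acc : List String),
      cs.foldl (fun m ci =>
          m.insert ci (candidates.foldl (fun r cj => r.insert cj (cell ci cj)) (m.getD ci (PySem.Dict.mk []))))
        (PySem.Dict.mk ((PySem.List.dedup acc).map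
          (fun k => (k, PySem.Dict.mk ((PySem.List.dedup candidates).map (fun cj => (cj, cell k cj)))))))
        = PySem.Dict.mk ((PySem.List.dedup (acc ++ cs)).map
          (fun k => (k, PySem.Dict.mk ((PySem.List.dedup candidates).map (fun cj => (cj, cell k cj)))))) := by
  intro cs
  induction cs with
  | nil => intro acc; simp
  | cons ci t ih =>
    intro acc
    simp only [List.foldl_cons]
    have hfold : candidates.foldl (fun r cj => r.insert cj (cell ci cj))
        ((PySem.Dict.mk ((PySem.List.dedup acc).map
          (fun k => (k, PySem.Dict.mk ((PySem.List.dedup candidates).map (fun cj => (cj, cell k cj))))))).getD ci (PySem.Dict.mk []))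
        = PySem.Dict.mk ((PySem.List.dedup candidates).map (fun cj => (cj, cell ci cj))) := by
      rw [pv_getD_mk_map]
      by_cases h : ci ∈ PySem.List.dedup acc
      · rw [if_pos h]
        have := pv_foldl_insert_dedup (fun cj => cell ci cj) candidates candidates
        rw [pv_dedup_append_self] at this
        exact this
      · rw [if_neg h]
        have := pv_foldl_insert_dedup (fun cj => cell ci cj) candidates []
        simpa using this
    rw [hfold, pv_insert_dedup_step (fun k => PySem.Dict.mk ((PySem.List.dedup candidates).map (fun cj => (cj, cell k cj)))) acc ci,
      ih (acc ++ [ci])]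
    simp

theorem pv_A_char (candidates : List String) (ballots : List (List (String × Int)))
    (hb : ballots ≠ []) (hc : candidates ≠ []) :
    calculate_preference_matrix candidates ballots
      = some ((PySem.List.dedup candidates).map (fun ci =>
          (ci, (PySem.List.dedup candidates).map (fun cj => (cj, pvCellA ballots (ballots.length : Int) ci cj))))) := by
  have hb' : ballots.isEmpty = false := by simpa [List.isEmpty_iff] using hb
  have hc' : candidates.isEmpty = false := by simpa [List.isEmpty_iff] using hc
  unfold calculate_preference_matrix
  rw [hb', hc']
  simp only [Bool.or_self]
  have hstep : (fun (m : PySem.Dict String (PySem.Dict String (Int × Int × Int))) ci =>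
      candidates.foldl (fun m cj =>
        if ci == cj then
          m.insert ci ((m.getD ci (PySem.Dict.mk [])).insert cj ((0 : Int), (0 : Int), (ballots.length : Int)))
        else
          let t := ballots.foldl (fun (t : Int × Int × Int) ballot =>
            let si := (PySem.Dict.mk ballot).getD ci 0
            let sj := (PySem.Dict.mk ballot).getD cj 0
            if si > sj then (t.1 + 1, t.2.1, t.2.2)
            else if sj > si then (t.1, t.2.1 + 1, t.2.2)
            else (t.1, t.2.1, t.2.2 + 1)) ((0 : Int), (0 : Int), (0 : Int))
          m.insert ci ((m.getD ci (PySem.Dict.mk [])).insert cj t)) m)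
      = (fun m ci =>
        m.insert ci (candidates.foldl
          (fun r cj => r.insert cj (pvCellA ballots (ballots.length : Int) ci cj))
          (m.getD ci (PySem.Dict.mk [])))) := by
    funext m ci
    have hrow : (fun (m : PySem.Dict String (PySem.Dict String (Int × Int × Int))) cj =>
        if ci == cj then
          m.insert ci ((m.getD ci (PySem.Dict.mk [])).insert cj ((0 : Int), (0 : Int), (ballots.length : Int)))
        else
          let t := ballots.foldl (fun (t : Int × Int × Int) ballot =>
            let si := (PySem.Dict.mk ballot).getD ci 0
            let sj := (PySem.Dict.mk ballot).getD cj 0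
            if si > sj then (t.1 + 1, t.2.1, t.2.2)
            else if sj > si then (t.1, t.2.1 + 1, t.2.2)
            else (t.1, t.2.1, t.2.2 + 1)) ((0 : Int), (0 : Int), (0 : Int))
          m.insert ci ((m.getD ci (PySem.Dict.mk [])).insert cj t))
        = (fun m cj => m.insert ci ((m.getD ci (PySem.Dict.mk [])).insert cj (pvCellA ballots (ballots.length : Int) ci cj))) := by
      funext m cj
      by_cases hij : ci = cj
      · simp [hij, pvCellA]
      · have : (ci == cj) = false := by simp [hij]
        simp only [this, Bool.false_eq_true, if_false]
        rw [pv_A_triple ci cj ballots ((0 : Int), (0 : Int), (0 : Int))]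
        simp [pvCellA, hij]
    rw [hrow, pv_A_inner ci _ candidates hc m]
  rw [hstep]
  have := pv_A_matrix candidates (pvCellA ballots (ballots.length : Int)) candidates []
  simp only [List.nil_append] at this
  have hinit : (PySem.Dict.mk ([] : List (String × PySem.Dict String (Int × Int × Int))))
      = PySem.Dict.mk ((PySem.List.dedup ([] : List String)).map
          (fun k => (k, PySem.Dict.mk ((PySem.List.dedup candidates).map (fun cj => (cj, pvCellA ballots (ballots.length : Int) k cj)))))) := by
    simp
  rw [hinit, this]
  simp [List.map_map, Function.comp]

-- ---------- B-side lemmas ----------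
theorem pv_foldl_getD_delta {α κ V : Type} [BEq κ] [LawfulBEq κ] [AddCommMonoid V]
    (step : PySem.Dict κ V → α → PySem.Dict κ V) (δ : α → κ → V)
    (h : ∀ d x q, (step d x).getD q 0 = d.getD q 0 + δ x q) :
    ∀ (l : List α) (d : PySem.Dict κ V) (q : κ),
      (l.foldl step d).getD q 0 = d.getD q 0 + (l.map (fun x => δ x q)).sum := by
  intro l
  induction l with
  | nil => intro d q; simp
  | cons x t ih =>
    intro d q
    simp only [List.foldl_cons, List.map_cons, List.sum_cons]
    rw [ih, h, add_assoc]

theorem pv_getD_incr {κ V : Type} [BEq κ] [LawfulBEq κ] [DecidableEq κ] [AddCommMonoid V]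
    (d : PySem.Dict κ V) (k q : κ) (w : V) :
    (d.insert k (d.getD k 0 + w)).getD q 0 = d.getD q 0 + (if q = k then w else 0) := by
  rw [PySem.Dict.getD_insert]
  by_cases h : q = k
  · subst h; simp
  · simp [h]

theorem pv_sum_filterMap {α V : Type} [AddCommMonoid V] (F : α → Option V) :
    ∀ (l : List α), (l.filterMap F).sum = (l.map (fun c => (F c).getD 0)).sum := by
  intro l
  induction l with
  | nil => simp
  | cons a t ih =>
    cases hF : F a <;> simp [hF, ih]

theorem pv_sum_single {κ V : Type} [DecidableEq κ] [AddCommMonoid V] :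
    ∀ (l : List κ), l.Nodup → ∀ (q : κ) (w : κ → V),
      (l.map (fun c => if q = c then w c else 0)).sum = if q ∈ l then w q else 0 := by
  intro l
  induction l with
  | nil => intro _ q w; simp
  | cons a t ih =>
    intro hn q w
    have hnd := (List.nodup_cons.mp hn)
    simp only [List.map_cons, List.sum_cons, List.mem_cons]
    rw [ih hnd.2]
    by_cases h : q = a
    · subst h
      simp [hnd.1]
    · simp [h]

theorem pv_sc_eq_zero_of_not_mem (b : List (String × Int)) (q : String)
    (h : q ∉ b.map Prod.fst) : pvSc b q = 0 := by
  unfold pvSc PySem.Dict.getD PySem.Dict.get?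
  have : List.find? (fun p => p.1 == q) b = none := by
    rw [List.find?_eq_none]
    intro p hp
    simp only [beq_iff_eq]
    intro hpq
    exact h (by exact List.mem_map.mpr ⟨p, hp, hpq⟩)
  simp [this]

-- B's per-ballot 'present' list
def pvPresent (cset : PySem.Set String) (ballot : List (String × Int)) : List (String × Int) :=
  (PySem.List.dedup (ballot.map Prod.fst)).filterMap (fun c =>
    let s := (PySem.Dict.mk ballot).getD c 0
    if s ≠ 0 ∧ cset.contains c then some (c, s) else none)

def pvSoloFold (cset : PySem.Set String) (ballots : List (List (String × Int))) :
    PySem.Dict String (Int × Int) :=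
  ballots.foldl (fun solo ballot =>
    (pvPresent cset ballot).foldl (fun solo cs =>
      let pn := solo.getD cs.1 (0, 0)
      solo.insert cs.1 (pn.1 + pvB2i (cs.2 > 0), pn.2 + pvB2i (cs.2 < 0))) solo) (PySem.Dict.mk [])

def pvPairFold (cset : PySem.Set String) (ballots : List (List (String × Int))) :
    PySem.Dict (String × String) (Int × Int × Int) :=
  ballots.foldl (fun pair ballot =>
    (pvPresent cset ballot).foldl (fun pair ci =>
      (pvPresent cset ballot).foldl (fun pair cj =>
        if ci.1 ≠ cj.1 then
          let w := pair.getD (ci.1, cj.1) (0, 0, 0)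
          pair.insert (ci.1, cj.1) (w.1 + pvB2i (ci.2 > cj.2), w.2.1 + pvB2i (ci.2 > 0), w.2.2 + pvB2i (ci.2 < 0))
        else pair) pair) pair) (PySem.Dict.mk [])

def pvStFold (cset : PySem.Set String) (ballots : List (List (String × Int))) :
    PySem.Dict String (Int × Int) × PySem.Dict (String × String) (Int × Int × Int) :=
  ballots.foldl (fun st ballot =>
    let present := pvPresent cset ballot
    let solo := present.foldl (fun solo cs =>
      let pn := solo.getD cs.1 (0, 0)
      solo.insert cs.1 (pn.1 + pvB2i (cs.2 > 0), pn.2 + pvB2i (cs.2 < 0))) st.1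
    let pair := present.foldl (fun pair ci =>
      present.foldl (fun pair cj =>
        if ci.1 ≠ cj.1 then
          let w := pair.getD (ci.1, cj.1) (0, 0, 0)
          pair.insert (ci.1, cj.1) (w.1 + pvB2i (ci.2 > cj.2), w.2.1 + pvB2i (ci.2 > 0), w.2.2 + pvB2i (ci.2 < 0))
        else pair) pair) st.2
    (solo, pair)) (PySem.Dict.mk [], PySem.Dict.mk [])

theorem pv_stFold_eq (cset : PySem.Set String) (ballots : List (List (String × Int))) :
    pvStFold cset ballots = (pvSoloFold cset ballots, pvPairFold cset ballots) := by
  unfold pvStFold pvSoloFold pvPairFold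
  exact PySem.List.foldl_prod_mk
    (fun (solo : PySem.Dict String (Int × Int)) (ballot : List (String × Int)) =>
      (pvPresent cset ballot).foldl (fun (solo : PySem.Dict String (Int × Int)) (cs : String × Int) =>
        let pn := solo.getD cs.1 (0, 0)
        solo.insert cs.1 (pn.1 + pvB2i (cs.2 > 0), pn.2 + pvB2i (cs.2 < 0))) solo)
    (fun (pair : PySem.Dict (String × String) (Int × Int × Int)) (ballot : List (String × Int)) =>
      (pvPresent cset ballot).foldl
        (fun (pair : PySem.Dict (String × String) (Int × Int × Int)) (ci : String × Int) =>
          (pvPresent cset ballot).foldl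
            (fun (pair : PySem.Dict (String × String) (Int × Int × Int)) (cj : String × Int) =>
              if ci.1 ≠ cj.1 then
                let w := pair.getD (ci.1, cj.1) (0, 0, 0)
                pair.insert (ci.1, cj.1)
                  (w.1 + pvB2i (ci.2 > cj.2), w.2.1 + pvB2i (ci.2 > 0), w.2.2 + pvB2i (ci.2 < 0))
              else pair) pair) pair)
    ballots (PySem.Dict.mk []) (PySem.Dict.mk [])

-- master evaluation of a keyed sum over the present list
theorem pv_sum_present {V : Type} [AddCommMonoid V] (cset : PySem.Set String) (b : List (String × Int))
    (g : String × Int → V) (q : String) :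
    ((pvPresent cset b).map (fun cs => if q = cs.1 then g cs else 0)).sum
      = if pvSc b q ≠ 0 ∧ cset.contains q then g (q, pvSc b q) else 0 := by
  unfold pvPresent
  rw [List.map_filterMap]
  rw [pv_sum_filterMap]
  have hterm : ∀ c : String,
      ((Option.map (fun cs => if q = cs.1 then g cs else 0)
        (let s := (PySem.Dict.mk b).getD c 0
         if s ≠ 0 ∧ cset.contains c then some (c, s) else none)).getD 0)
      = (if q = c then (if pvSc b c ≠ 0 ∧ cset.contains c = true then g (c, pvSc b c) else 0) else 0) := by
    intro c
    simp only [pvSc]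
    split_ifs with h1 h2 h3 <;> simp_all
  have : (List.map (fun c => (Option.map (fun cs => if q = cs.1 then g cs else 0)
        (let s := (PySem.Dict.mk b).getD c 0
         if s ≠ 0 ∧ cset.contains c then some (c, s) else none)).getD 0)
        (PySem.List.dedup (b.map Prod.fst)))
      = List.map (fun c => if q = c then (if pvSc b c ≠ 0 ∧ cset.contains c = true then g (c, pvSc b c) else 0) else 0)
        (PySem.List.dedup (b.map Prod.fst)) := by
    apply List.map_congr_left
    intro c _
    exact hterm c
  rw [this, pv_sum_single _ (PySem.List.nodup_dedup _) q _]
  by_cases hq : q ∈ b.map Prod.fst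
  · rw [if_pos ((PySem.List.mem_dedup _ _).mpr hq)]
  · rw [if_neg (fun hh => hq ((PySem.List.mem_dedup _ _).mp hh))]
    have h0 : pvSc b q = 0 := pv_sc_eq_zero_of_not_mem b q hq
    simp [h0]



theorem pv_sum_pair {α : Type} (l : List α) (f g : α → Int) :
    (l.map (fun x => (f x, g x))).sum = ((l.map f).sum, (l.map g).sum) := by
  induction l with
  | nil => rfl
  | cons a t ih => simp [ih]

theorem pv_sum_triple {α : Type} (l : List α) (f g h : α → Int) :
    (l.map (fun x => (f x, g x, h x))).sum = ((l.map f).sum, (l.map g).sum, (l.map h).sum) := by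
  induction l with
  | nil => rfl
  | cons a t ih => simp [ih]

theorem pv_B_solo (cset : PySem.Set String) (ballots : List (List (String × Int))) (q : String)
    (hq : cset.contains q = true) :
    (pvSoloFold cset ballots).getD q (0, 0)
    = ((ballots.map (fun b => pvB2i (pvSc b q > 0))).sum,
       (ballots.map (fun b => pvB2i (pvSc b q < 0))).sum) := by
  unfold pvSoloFold
  have hstep : ∀ (d : PySem.Dict String (Int × Int)) (cs : String × Int) (q' : String),
      ((fun (solo : PySem.Dict String (Int × Int)) (cs : String × Int) =>
        let pn := solo.getD cs.1 (0, 0)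
        solo.insert cs.1 (pn.1 + pvB2i (cs.2 > 0), pn.2 + pvB2i (cs.2 < 0))) d cs).getD q' 0
      = d.getD q' 0 + (if q' = cs.1 then (pvB2i (cs.2 > 0), pvB2i (cs.2 < 0)) else 0) := by
    intro d cs q'
    exact pv_getD_incr d cs.1 q' (pvB2i (cs.2 > 0), pvB2i (cs.2 < 0))
  have h1 : ∀ (d : PySem.Dict String (Int × Int)) (b : List (String × Int)) (q' : String),
      ((pvPresent cset b).foldl (fun solo cs =>
          let pn := solo.getD cs.1 (0, 0)
          solo.insert cs.1 (pn.1 + pvB2i (cs.2 > 0), pn.2 + pvB2i (cs.2 < 0))) d).getD q' (0, 0)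
      = d.getD q' (0, 0)
        + (if pvSc b q' ≠ 0 ∧ cset.contains q' then (pvB2i (pvSc b q' > 0), pvB2i (pvSc b q' < 0)) else 0) := by
    intro d b q'
    have := pv_foldl_getD_delta _ (fun (cs : String × Int) (q' : String) =>
        if q' = cs.1 then (pvB2i (cs.2 > 0), pvB2i (cs.2 < 0)) else 0)
      (fun d cs q' => hstep d cs q') (pvPresent cset b) d q'
    rw [pv_sum_present cset b _ q'] at this
    exact this
  have main := pv_foldl_getD_delta _ (fun (b : List (String × Int)) (q' : String) =>
      if pvSc b q' ≠ 0 ∧ cset.contains q' then (pvB2i (pvSc b q' > 0), pvB2i (pvSc b q' < 0)) else 0)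
    (fun d b q' => h1 d b q') ballots (PySem.Dict.mk []) q
  refine Eq.trans main ?_
  have h0 : (PySem.Dict.mk ([] : List (String × (Int × Int)))).getD q 0 = 0 := by
    simp [PySem.Dict.getD, PySem.Dict.get?]
  rw [h0, zero_add]
  have hcongr : (ballots.map (fun b =>
      if pvSc b q ≠ 0 ∧ cset.contains q then (pvB2i (pvSc b q > 0), pvB2i (pvSc b q < 0)) else 0)).sum
      = (ballots.map (fun b => ((pvB2i (pvSc b q > 0), pvB2i (pvSc b q < 0)) : Int × Int))).sum := by
    congr 1
    apply List.map_congr_left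
    intro b _
    by_cases h : pvSc b q = 0
    · simp [h, pvB2i]
      rfl
    · have hq' : q ∈ cset := by
        have := hq
        simp only [PySem.Set.contains, List.contains_iff_mem] at this
        exact this
      simp [h, hq']
  rw [hcongr, pv_sum_pair]


-- the three per-pair co-occurrence tallies accumulated by B's per-ballot double loop
theorem pv_B_pair (cset : PySem.Set String) (ballots : List (List (String × Int))) (i j : String)
    (hij : i ≠ j) (hi : cset.contains i = true) (hj : cset.contains j = true) :
    (pvPairFold cset ballots).getD (i, j) (0, 0, 0)
    = ((ballots.map (fun b => if pvSc b i ≠ 0 ∧ pvSc b j ≠ 0 then pvB2i (pvSc b i > pvSc b j) else 0)).sum,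
       (ballots.map (fun b => if pvSc b i ≠ 0 ∧ pvSc b j ≠ 0 then pvB2i (pvSc b i > 0) else 0)).sum,
       (ballots.map (fun b => if pvSc b i ≠ 0 ∧ pvSc b j ≠ 0 then pvB2i (pvSc b i < 0) else 0)).sum) := by
  unfold pvPairFold
  have hstep : ∀ (d : PySem.Dict (String × String) (Int × Int × Int)) (ci cj : String × Int)
      (q : String × String),
      ((fun (pair : PySem.Dict (String × String) (Int × Int × Int)) (cj : String × Int) =>
        if ci.1 ≠ cj.1 then
          let w := pair.getD (ci.1, cj.1) (0, 0, 0)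
          pair.insert (ci.1, cj.1)
            (w.1 + pvB2i (ci.2 > cj.2), w.2.1 + pvB2i (ci.2 > 0), w.2.2 + pvB2i (ci.2 < 0))
        else pair) d cj).getD q 0
      = d.getD q 0 + (if q.2 = cj.1 then
          (if ci.1 ≠ cj.1 ∧ q.1 = ci.1 then (pvB2i (ci.2 > cj.2), pvB2i (ci.2 > 0), pvB2i (ci.2 < 0)) else 0)
          else 0) := by
    intro d ci cj q
    by_cases hne : ci.1 = cj.1
    · simp only [hne, ne_eq, not_true_eq_false, false_and, if_false, ite_self, add_zero]
    · simp only [ne_eq, hne, not_false_eq_true, if_true]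
      have := pv_getD_incr d (ci.1, cj.1) q
        ((pvB2i (ci.2 > cj.2), pvB2i (ci.2 > 0), pvB2i (ci.2 < 0)) : Int × Int × Int)
      refine Eq.trans this ?_
      congr 1
      by_cases hq : q = (ci.1, cj.1)
      · subst hq; simp
      · rw [if_neg hq]
        rw [Prod.ext_iff] at hq
        push Not at hq
        by_cases h2 : q.2 = cj.1
        · rw [if_pos h2, if_neg]
          rintro ⟨-, h1⟩
          exact (hq h1) h2
        · rw [if_neg h2]
  have hmid : ∀ (d : PySem.Dict (String × String) (Int × Int × Int)) (b : List (String × Int))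
      (ci : String × Int) (q : String × String),
      ((pvPresent cset b).foldl (fun pair cj =>
          if ci.1 ≠ cj.1 then
            let w := pair.getD (ci.1, cj.1) (0, 0, 0)
            pair.insert (ci.1, cj.1)
              (w.1 + pvB2i (ci.2 > cj.2), w.2.1 + pvB2i (ci.2 > 0), w.2.2 + pvB2i (ci.2 < 0))
          else pair) d).getD q 0
      = d.getD q 0 + (if pvSc b q.2 ≠ 0 ∧ cset.contains q.2 then
          (if ci.1 ≠ q.2 ∧ q.1 = ci.1 then
            (pvB2i (ci.2 > pvSc b q.2), pvB2i (ci.2 > 0), pvB2i (ci.2 < 0)) else 0) else 0) := by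
    intro d b ci q
    have := pv_foldl_getD_delta _ (fun (cj : String × Int) (q : String × String) =>
        if q.2 = cj.1 then
          (if ci.1 ≠ cj.1 ∧ q.1 = ci.1 then (pvB2i (ci.2 > cj.2), pvB2i (ci.2 > 0), pvB2i (ci.2 < 0)) else 0)
        else 0)
      (fun d cj q => hstep d ci cj q) (pvPresent cset b) d q
    refine Eq.trans this ?_
    congr 1
    exact pv_sum_present cset b
      (fun cj => if ci.1 ≠ cj.1 ∧ q.1 = ci.1 then (pvB2i (ci.2 > cj.2), pvB2i (ci.2 > 0), pvB2i (ci.2 < 0)) else 0) q.2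
  have hball : ∀ (d : PySem.Dict (String × String) (Int × Int × Int)) (b : List (String × Int))
      (q : String × String),
      ((pvPresent cset b).foldl (fun pair ci =>
          (pvPresent cset b).foldl (fun pair cj =>
            if ci.1 ≠ cj.1 then
              let w := pair.getD (ci.1, cj.1) (0, 0, 0)
              pair.insert (ci.1, cj.1)
                (w.1 + pvB2i (ci.2 > cj.2), w.2.1 + pvB2i (ci.2 > 0), w.2.2 + pvB2i (ci.2 < 0))
            else pair) pair) d).getD q 0
      = d.getD q 0 + (if pvSc b q.1 ≠ 0 ∧ cset.contains q.1 then
          (if pvSc b q.2 ≠ 0 ∧ cset.contains q.2 ∧ q.1 ≠ q.2 then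
            (pvB2i (pvSc b q.1 > pvSc b q.2), pvB2i (pvSc b q.1 > 0), pvB2i (pvSc b q.1 < 0)) else 0) else 0) := by
    intro d b q
    have := pv_foldl_getD_delta _ (fun (ci : String × Int) (q : String × String) =>
        if pvSc b q.2 ≠ 0 ∧ cset.contains q.2 then
          (if ci.1 ≠ q.2 ∧ q.1 = ci.1 then
            (pvB2i (ci.2 > pvSc b q.2), pvB2i (ci.2 > 0), pvB2i (ci.2 < 0)) else 0) else 0)
      (fun d ci q => hmid d b ci q) (pvPresent cset b) d q
    refine Eq.trans this ?_
    congr 1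
    have hsh : (List.map (fun (ci : String × Int) =>
        if pvSc b q.2 ≠ 0 ∧ cset.contains q.2 = true then
          (if ci.1 ≠ q.2 ∧ q.1 = ci.1 then
            (pvB2i (ci.2 > pvSc b q.2), pvB2i (ci.2 > 0), pvB2i (ci.2 < 0)) else 0) else 0) (pvPresent cset b))
        = List.map (fun (ci : String × Int) =>
          if q.1 = ci.1 then
            (if pvSc b q.2 ≠ 0 ∧ cset.contains q.2 = true ∧ ci.1 ≠ q.2 then
              (pvB2i (ci.2 > pvSc b q.2), pvB2i (ci.2 > 0), pvB2i (ci.2 < 0)) else 0) else 0) (pvPresent cset b) := by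
      apply List.map_congr_left
      intro ci _
      rcases Classical.em (pvSc b q.2 ≠ 0) with hA | hA <;>
      rcases Classical.em (cset.contains q.2 = true) with hB | hB <;>
      rcases Classical.em (q.1 = ci.1) with hC | hC <;>
      rcases Classical.em (ci.1 ≠ q.2) with hD | hD <;>
      simp [hA, hB, hC, hD]
    rw [hsh, pv_sum_present cset b
      (fun ci => if pvSc b q.2 ≠ 0 ∧ cset.contains q.2 = true ∧ ci.1 ≠ q.2 then
        (pvB2i (ci.2 > pvSc b q.2), pvB2i (ci.2 > 0), pvB2i (ci.2 < 0)) else 0) q.1]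
  have main := pv_foldl_getD_delta _ (fun (b : List (String × Int)) (q : String × String) =>
      if pvSc b q.1 ≠ 0 ∧ cset.contains q.1 then
        (if pvSc b q.2 ≠ 0 ∧ cset.contains q.2 ∧ q.1 ≠ q.2 then
          (pvB2i (pvSc b q.1 > pvSc b q.2), pvB2i (pvSc b q.1 > 0), pvB2i (pvSc b q.1 < 0)) else 0) else 0)
    (fun d b q => hball d b q) ballots (PySem.Dict.mk []) (i, j)
  refine Eq.trans main ?_
  have h0 : (PySem.Dict.mk ([] : List ((String × String) × (Int × Int × Int)))).getD (i, j) 0 = 0 := by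
    simp [PySem.Dict.getD, PySem.Dict.get?]
  rw [h0, zero_add]
  have hcongr : (ballots.map (fun b =>
      if pvSc b (i, j).1 ≠ 0 ∧ cset.contains (i, j).1 then
        (if pvSc b (i, j).2 ≠ 0 ∧ cset.contains (i, j).2 ∧ (i, j).1 ≠ (i, j).2 then
          (pvB2i (pvSc b (i, j).1 > pvSc b (i, j).2), pvB2i (pvSc b (i, j).1 > 0), pvB2i (pvSc b (i, j).1 < 0))
         else 0) else 0)).sum
      = (ballots.map (fun b =>
          ((if pvSc b i ≠ 0 ∧ pvSc b j ≠ 0 then pvB2i (pvSc b i > pvSc b j) else 0,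
            if pvSc b i ≠ 0 ∧ pvSc b j ≠ 0 then pvB2i (pvSc b i > 0) else 0,
            if pvSc b i ≠ 0 ∧ pvSc b j ≠ 0 then pvB2i (pvSc b i < 0) else 0) : Int × Int × Int))).sum := by
    congr 1
    apply List.map_congr_left
    intro b _
    have hi' : i ∈ cset := by
      have := hi; simp only [PySem.Set.contains, List.contains_iff_mem] at this; exact this
    have hj' : j ∈ cset := by
      have := hj; simp only [PySem.Set.contains, List.contains_iff_mem] at this; exact this
    by_cases h1 : pvSc b i = 0 <;> by_cases h2 : pvSc b j = 0 <;>
      simp [h1, h2, hi', hj', hij, Prod.ext_iff]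
  rw [hcongr, pv_sum_triple]


theorem pv_sum_comb {α : Type} (l : List α) (F1 F2 F3 F4 F5 G : α → Int)
    (h : ∀ x, F1 x + (F2 x - F3 x) + (F4 x - F5 x) = G x) :
    (l.map F1).sum + ((l.map F2).sum - (l.map F3).sum) + ((l.map F4).sum - (l.map F5).sum)
      = (l.map G).sum := by
  induction l with
  | nil => simp
  | cons a t ih =>
    simp only [List.map_cons, List.sum_cons]
    have := h a
    omega

theorem pv_sum_len {α : Type} (l : List α) (G L E : α → Int)
    (h : ∀ x, G x + L x + E x = 1) :
    (l.length : Int) - (l.map G).sum - (l.map L).sum = (l.map E).sum := by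
  induction l with
  | nil => simp
  | cons a t ih =>
    simp only [List.map_cons, List.sum_cons, List.length_cons]
    have := h a
    push_cast
    omega

-- pointwise identities combining B's counters into A's per-ballot indicators
theorem pv_point_f (b : List (String × Int)) (i j : String) :
    (if pvSc b i ≠ 0 ∧ pvSc b j ≠ 0 then pvB2i (pvSc b i > pvSc b j) else 0)
      + (pvB2i (pvSc b i > 0) - (if pvSc b i ≠ 0 ∧ pvSc b j ≠ 0 then pvB2i (pvSc b i > 0) else 0))
      + (pvB2i (pvSc b j < 0) - (if pvSc b j ≠ 0 ∧ pvSc b i ≠ 0 then pvB2i (pvSc b j < 0) else 0))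
      = pvG i j b := by
  unfold pvG pvB2i
  by_cases h1 : pvSc b i = 0 <;> by_cases h2 : pvSc b j = 0 <;>
    simp [h1, h2] <;> (try split_ifs) <;> omega

theorem pv_point_a (b : List (String × Int)) (i j : String) :
    (if pvSc b j ≠ 0 ∧ pvSc b i ≠ 0 then pvB2i (pvSc b j > pvSc b i) else 0)
      + (pvB2i (pvSc b j > 0) - (if pvSc b j ≠ 0 ∧ pvSc b i ≠ 0 then pvB2i (pvSc b j > 0) else 0))
      + (pvB2i (pvSc b i < 0) - (if pvSc b i ≠ 0 ∧ pvSc b j ≠ 0 then pvB2i (pvSc b i < 0) else 0))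
      = pvL i j b := by
  unfold pvL pvB2i
  by_cases h1 : pvSc b i = 0 <;> by_cases h2 : pvSc b j = 0 <;>
    simp [h1, h2] <;> (try split_ifs) <;> omega

theorem pv_point_e (b : List (String × Int)) (i j : String) :
    pvG i j b + pvL i j b + pvE i j b = 1 := by
  unfold pvG pvL pvE
  split_ifs <;> omega

theorem pv_B_char (candidates : List String) (ballots : List (List (String × Int)))
    (hb : ballots ≠ []) (hc : candidates ≠ []) :
    calculate_preference_matrix_alt candidates ballots
      = some ((PySem.List.dedup candidates).map (fun ci =>
          (ci, (PySem.List.dedup candidates).map (fun cj =>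
            (cj, pvCellA ballots (ballots.length : Int) ci cj))))) := by
  have hb' : ballots.isEmpty = false := by simpa [List.isEmpty_iff] using hb
  have hc' : candidates.isEmpty = false := by simpa [List.isEmpty_iff] using hc
  unfold calculate_preference_matrix_alt
  rw [hb', hc']
  simp only [Bool.or_self, Bool.false_eq_true, if_false]
  show some ((PySem.List.dedup candidates).map (fun ci =>
      (ci, (PySem.List.dedup candidates).map (fun cj =>
        if ci = cj then (cj, ((0 : Int), (0 : Int), (ballots.length : Int)))
        else
          (cj,
            ((pvStFold (PySem.Set.ofList (PySem.List.dedup candidates)) ballots).2.getD (ci, cj) (0, 0, 0)).1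
              + (((pvStFold (PySem.Set.ofList (PySem.List.dedup candidates)) ballots).1.getD ci (0, 0)).1
                 - ((pvStFold (PySem.Set.ofList (PySem.List.dedup candidates)) ballots).2.getD (ci, cj) (0, 0, 0)).2.1)
              + (((pvStFold (PySem.Set.ofList (PySem.List.dedup candidates)) ballots).1.getD cj (0, 0)).2
                 - ((pvStFold (PySem.Set.ofList (PySem.List.dedup candidates)) ballots).2.getD (cj, ci) (0, 0, 0)).2.2),
             ((pvStFold (PySem.Set.ofList (PySem.List.dedup candidates)) ballots).2.getD (cj, ci) (0, 0, 0)).1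
              + (((pvStFold (PySem.Set.ofList (PySem.List.dedup candidates)) ballots).1.getD cj (0, 0)).1
                 - ((pvStFold (PySem.Set.ofList (PySem.List.dedup candidates)) ballots).2.getD (cj, ci) (0, 0, 0)).2.1)
              + (((pvStFold (PySem.Set.ofList (PySem.List.dedup candidates)) ballots).1.getD ci (0, 0)).2
                 - ((pvStFold (PySem.Set.ofList (PySem.List.dedup candidates)) ballots).2.getD (ci, cj) (0, 0, 0)).2.2),
             (ballots.length : Int)
              - (((pvStFold (PySem.Set.ofList (PySem.List.dedup candidates)) ballots).2.getD (ci, cj) (0, 0, 0)).1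
                 + (((pvStFold (PySem.Set.ofList (PySem.List.dedup candidates)) ballots).1.getD ci (0, 0)).1
                    - ((pvStFold (PySem.Set.ofList (PySem.List.dedup candidates)) ballots).2.getD (ci, cj) (0, 0, 0)).2.1)
                 + (((pvStFold (PySem.Set.ofList (PySem.List.dedup candidates)) ballots).1.getD cj (0, 0)).2
                    - ((pvStFold (PySem.Set.ofList (PySem.List.dedup candidates)) ballots).2.getD (cj, ci) (0, 0, 0)).2.2))
              - (((pvStFold (PySem.Set.ofList (PySem.List.dedup candidates)) ballots).2.getD (cj, ci) (0, 0, 0)).1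
                 + (((pvStFold (PySem.Set.ofList (PySem.List.dedup candidates)) ballots).1.getD cj (0, 0)).1
                    - ((pvStFold (PySem.Set.ofList (PySem.List.dedup candidates)) ballots).2.getD (cj, ci) (0, 0, 0)).2.1)
                 + (((pvStFold (PySem.Set.ofList (PySem.List.dedup candidates)) ballots).1.getD ci (0, 0)).2
                    - ((pvStFold (PySem.Set.ofList (PySem.List.dedup candidates)) ballots).2.getD (ci, cj) (0, 0, 0)).2.2)))))))
    = some ((PySem.List.dedup candidates).map (fun ci =>
        (ci, (PySem.List.dedup candidates).map (fun cj =>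
          (cj, pvCellA ballots (ballots.length : Int) ci cj)))))
  rw [pv_stFold_eq]
  apply congrArg
  apply List.map_congr_left
  intro ci hci
  apply congrArg (Prod.mk ci)
  apply List.map_congr_left
  intro cj hcj
  by_cases hij : ci = cj
  · simp [hij, pvCellA]
  · have hi : (PySem.Set.ofList (PySem.List.dedup candidates)).contains ci = true := by
      simp only [PySem.Set.contains, List.contains_iff_mem]
      rw [PySem.Set.mem_ofList]
      exact hci
    have hj : (PySem.Set.ofList (PySem.List.dedup candidates)).contains cj = true := by
      simp only [PySem.Set.contains, List.contains_iff_mem]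
      rw [PySem.Set.mem_ofList]
      exact hcj
    rw [if_neg hij]
    rw [pv_B_solo _ ballots ci hi, pv_B_solo _ ballots cj hj,
       pv_B_pair _ ballots ci cj hij hi hj, pv_B_pair _ ballots cj ci (Ne.symm hij) hj hi]
    have hf := pv_sum_comb ballots _ _ _ _ _ _ (fun b => pv_point_f b ci cj)
    have ha := pv_sum_comb ballots _ _ _ _ _ _ (fun b => pv_point_a b ci cj)
    simp only []
    rw [hf, ha]
    have hn := pv_sum_len ballots (pvG ci cj) (pvL ci cj) (pvE ci cj) (fun b => pv_point_e b ci cj)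
    rw [hn]
    simp [pvCellA, hij]

-- ===== VERDICT (by name: the statement is the Claim_ definition above) =====
theorem calculate_preference_matrix_spec : Claim_equal_calculate_preference_matrix := by
  intro candidates ballots _
  unfold Spec_calculate_preference_matrix
  by_cases hb : ballots = []
  · subst hb
    simp [calculate_preference_matrix, calculate_preference_matrix_alt]
  · by_cases hc : candidates = []
    · subst hc
      simp [calculate_preference_matrix, calculate_preference_matrix_alt]
    · rw [pv_A_char candidates ballots hb hc, pv_B_char candidates ballots hb hc]
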